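-- pv_equiv track=rewrite | github.com/GottixX/Zada4i | week 4/winter.py | winter_is_coming
-- ===== SOURCE A (Python) =====
-- def winter_is_coming(seasons):
--     counter = 0
--     winter_is_coming = False
--     for season in seasons:
--         if season == "winter":
--             counter = 0
--         else:
--             counter += 1
--     if counter >= 5:
--         winter_is_coming = True
--     return winter_is_coming
-- ===== SOURCE B (Python) =====
-- def winter_is_coming(seasons):
--     count = 0
--     for season in reversed(seasons):
--         if season == "winter":
--             break
--         count += 1
--     return count >= 5
-- ===== Notes on version B (the rewrite author's own statement) =====
-- stated objective: idiomatic
-- what changed: B walks the list from the end, counting trailing non-'winter' entries and breaking at the first 'winter', instead of scanning the whole list forward with a counter reset on every 'winter'.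
import Mathlib
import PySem

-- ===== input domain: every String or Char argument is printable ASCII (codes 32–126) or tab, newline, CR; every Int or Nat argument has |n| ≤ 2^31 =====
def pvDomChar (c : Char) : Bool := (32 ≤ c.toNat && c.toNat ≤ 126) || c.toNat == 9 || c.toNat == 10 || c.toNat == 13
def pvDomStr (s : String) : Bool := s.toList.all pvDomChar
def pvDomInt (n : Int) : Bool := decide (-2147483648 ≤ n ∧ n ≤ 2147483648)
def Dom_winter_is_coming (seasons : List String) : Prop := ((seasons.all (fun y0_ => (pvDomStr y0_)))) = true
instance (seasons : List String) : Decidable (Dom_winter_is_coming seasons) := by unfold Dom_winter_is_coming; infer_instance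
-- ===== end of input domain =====

-- B counts trailing non-"winter" entries from the end, breaking at the first "winter",
-- instead of A's forward scan resetting a counter (idiomatic; same return value).


-- ===== PORT A =====
def winter_is_coming (seasons : List String) : Bool :=
  let counter : Int := seasons.foldl (fun counter season =>
    if season == "winter" then 0 else counter + 1) 0
  if counter ≥ 5 then true else false

-- ===== PORT B =====
-- loop over reversed(seasons), breaking at the first "winter"
def wicAltCount : List String → Int
  | [] => 0
  | season :: rest => if season == "winter" then 0 else 1 + wicAltCount rest

def winter_is_coming_alt (seasons : List String) : Bool :=
  wicAltCount seasons.reverse ≥ 5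

-- ===== PRECONDITION & SPEC =====
def Spec_winter_is_coming (seasons : List String) (out : Bool) : Prop := out = winter_is_coming_alt seasons
instance (seasons : List String) (out : Bool) : Decidable (Spec_winter_is_coming seasons out) := by unfold Spec_winter_is_coming; infer_instance

-- ===== CLAIM (what is proved, stated in full; the proofs are below) =====
def Claim_equal_winter_is_coming : Prop := ∀ (seasons : List String), Dom_winter_is_coming seasons → Spec_winter_is_coming seasons (winter_is_coming seasons)

-- ===== LEMMAS AND PROOFS =====
theorem wic_foldl_eq_altCount (l : List String) :
    l.foldl (fun counter season => if season == "winter" then 0 else counter + 1) (0 : Int)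
      = wicAltCount l.reverse := by
  induction l using List.reverseRecOn with
  | nil => simp [wicAltCount]
  | append_singleton l' s ih =>
    rw [List.foldl_append, List.reverse_append]
    simp only [List.foldl, List.reverse_singleton, List.singleton_append, wicAltCount, ih]
    split <;> omega

-- ===== VERDICT (by name: the statement is the Claim_ definition above) =====
theorem winter_is_coming_spec : Claim_equal_winter_is_coming := by
  intro seasons _
  unfold Spec_winter_is_coming winter_is_coming winter_is_coming_alt
  rw [wic_foldl_eq_altCount]
  by_cases h : wicAltCount seasons.reverse ≥ 5 <;> simp [h]
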